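-- pv_equiv track=rewrite | github.com/Saharsh-R/adventofcode | y2024/d24/d24.py | get_number_value
-- ===== SOURCE A (Python) =====
-- def get_number_value(data, c):
--     assert c == 'x' or c == 'y'
--     ans_keep = []
--     for x in data:
--         if x[0] == c:
--             ans_keep.append(x)
--     ans_keep.sort(reverse=True)
--     ans = 0
--     for x in ans_keep:
--         ans = ans << 1
--         ans += data[x][1]
--     return ans
-- ===== SOURCE B (Python) =====
-- def get_number_value(data, c):
--     assert c == 'x' or c == 'y'
--     remaining = [k for k in data if k.startswith(c)]
--     ans = 0
--     weight = 1
--     while remaining: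
--         m = min(remaining)
--         remaining.remove(m)
--         ans += data[m][1] * weight
--         weight *= 2
--     return ans
-- ===== Notes on version B (the rewrite author's own statement) =====
-- stated objective: alternative
-- what changed: B never sorts: it repeatedly extracts the minimum remaining key (selection) and accumulates value*weight with a doubling LSB weight, instead of A's append loop, reverse sort and MSB-first shift-accumulate.
import Mathlib
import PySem

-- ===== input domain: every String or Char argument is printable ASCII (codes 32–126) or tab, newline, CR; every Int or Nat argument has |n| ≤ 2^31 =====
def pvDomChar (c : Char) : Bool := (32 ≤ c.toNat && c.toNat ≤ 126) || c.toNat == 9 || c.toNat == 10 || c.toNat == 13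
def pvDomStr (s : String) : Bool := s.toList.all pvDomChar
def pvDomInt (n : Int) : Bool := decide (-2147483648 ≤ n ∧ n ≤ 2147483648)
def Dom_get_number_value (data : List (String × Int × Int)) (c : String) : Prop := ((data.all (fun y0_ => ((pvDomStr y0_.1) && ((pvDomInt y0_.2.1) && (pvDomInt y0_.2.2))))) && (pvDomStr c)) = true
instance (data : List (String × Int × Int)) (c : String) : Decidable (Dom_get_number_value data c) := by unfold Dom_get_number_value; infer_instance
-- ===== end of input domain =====

-- B replaces A's append/reverse-sort/shift-accumulate with a sort-free selection loop: repeatedly extract the minimum remaining key and accumulate value*weight with a doubling LSB weight (alternative algorithm, no sort call).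


-- ===== PORT A =====
-- data is a Python dict[str, (int, int)], ported as an insertion-order association list; iteration is over its keys.
def get_number_value (data : List (String × Int × Int)) (c : String) : Int :=
  let d : PySem.Dict String (Int × Int) := PySem.Dict.ofList data
  -- assert c == 'x' or c == 'y': AssertionError outside Pre_
  let ans_keep : List String := d.keys.foldl (fun acc x =>
    if (match PySem.Str.pyGet? x 0 with
        | some ch => decide ([ch] = c.toList)   -- x[0] == c; none = IndexError, excluded by Pre_
        | none => false) then acc ++ [x] else acc) []
  let sorted_keep := PySem.List.sorted ans_keep (fun x => x) true
  -- data[x]: x is a key of d, so getD's default (0,0) is unreachable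
  sorted_keep.foldl (fun ans x => (ans <<< (1 : Nat)) + (d.getD x (0, 0)).2) 0

-- ===== PORT B =====
-- the while loop of Source B: min(remaining), remaining.remove(m), ans += data[m][1]*weight, weight *= 2
-- remove? is some here (m ∈ remaining by min?_mem); getD [] is an unreachable default, not a fallback
def gnvLoop (d : PySem.Dict String (Int × Int)) (rem : List String) (ans weight : Int) : Int :=
  match h : PySem.List.min? rem (fun x => x) with
  | none => ans
  | some m =>
      gnvLoop d ((PySem.List.remove? rem m).getD []) (ans + (d.getD m (0, 0)).2 * weight) (weight * 2)
termination_by rem.length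
decreasing_by
  have hm := PySem.List.min?_mem h
  rw [PySem.List.remove?_eq_some_erase rem m hm]
  have h1 := List.length_erase_of_mem hm
  have h2 := List.length_pos_of_mem hm
  simp only [Option.getD_some]
  omega

def get_number_value_alt (data : List (String × Int × Int)) (c : String) : Int :=
  let d : PySem.Dict String (Int × Int) := PySem.Dict.ofList data
  -- assert c == 'x' or c == 'y': AssertionError outside Pre_
  let remaining := d.keys.filter (fun k => PySem.Str.startswith k c)
  gnvLoop d remaining 0 1

-- ===== PRECONDITION & SPEC =====
-- Pre_ excludes c other than 'x'/'y' (A's assert raises AssertionError) and dicts containing the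
-- empty-string key (A's x[0] raises IndexError); on both A returns no value.
def Pre_get_number_value (data : List (String × Int × Int)) (c : String) : Prop :=
  (c = "x" ∨ c = "y") ∧ ∀ p ∈ data, p.1 ≠ ""
instance (data : List (String × Int × Int)) (c : String) : Decidable (Pre_get_number_value data c) := by unfold Pre_get_number_value; infer_instance
def pvWitness_get_number_value : (List (String × Int × Int)) × String :=
  ([("x0", (1, 1)), ("x1", (0, 0)), ("y0", (0, 2))], "x")

def Spec_get_number_value (data : List (String × Int × Int)) (c : String) (out : Int) : Prop := out = get_number_value_alt data c
instance (data : List (String × Int × Int)) (c : String) (out : Int) : Decidable (Spec_get_number_value data c out) := by unfold Spec_get_number_value; infer_instance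

-- ===== CLAIM (what is proved, stated in full; the proofs are below) =====
def Claim_equal_get_number_value : Prop := ∀ (data : List (String × Int × Int)) (c : String), Dom_get_number_value data c → Pre_get_number_value data c → Spec_get_number_value data c (get_number_value data c)

-- ===== LEMMAS AND PROOFS =====

-- keys of a dict built from an association list are the deduplicated first components
theorem keys_ofList_eq {ν : Type} (data : List (String × ν)) :
    (PySem.Dict.ofList data).keys = PySem.Set.ofList (data.map Prod.fst) := by
  show ((PySem.Dict.empty.update data)).keys = _
  unfold PySem.Dict.update
  rw [PySem.Dict.keys_foldl_insert_key data Prod.fst (fun _ p => p.2) PySem.Dict.empty]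
  rw [PySem.Dict.keys_empty, PySem.Set.update_nil_left]

-- the ascending sort of a nodup list is its minimum followed by the sort of the rest
theorem sorted_eq_min_cons (rem : List String) (m : String)
    (hnd : rem.Nodup) (h : PySem.List.min? rem (fun x => x) = some m) :
    PySem.List.sorted rem (fun x => x) false
      = m :: PySem.List.sorted (rem.erase m) (fun x => x) false := by
  have hm := PySem.List.min?_mem h
  apply PySem.List.sorted_eq_of_perm_of_pairwise_lt
  · exact (List.Perm.cons m (PySem.List.sorted_perm _ _ _)).trans (List.perm_cons_erase hm).symm
  · rw [List.pairwise_cons]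
    constructor
    · intro y hy
      have hy' : y ∈ rem.erase m := (PySem.List.mem_sorted _ _ _ _).mp hy
      have hle : m ≤ y := PySem.List.min?_isMin h y (List.mem_of_mem_erase hy')
      have hne : y ≠ m := fun hym => (hnd.not_mem_erase) (hym ▸ hy')
      exact lt_of_le_of_ne hle (Ne.symm hne)
    · have hnd' : (PySem.List.sorted (rem.erase m) (fun x => x) false).Nodup :=
        (PySem.List.sorted_perm _ _ _).nodup_iff.mpr (hnd.erase m)
      have hle := PySem.List.sorted_pairwise (rem.erase m) (fun x => x)
      exact (hle.and hnd').imp (fun ⟨h1, h2⟩ => lt_of_le_of_ne h1 h2)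

-- the selection loop computes ans + weight * (LSB-first value of the ascending arrangement)
theorem gnvLoop_eq_sorted_foldr (d : PySem.Dict String (Int × Int)) :
    ∀ (n : Nat) (rem : List String), rem.length ≤ n → rem.Nodup → ∀ (ans weight : Int),
      gnvLoop d rem ans weight
        = ans + weight * ((PySem.List.sorted rem (fun x => x) false).foldr
            (fun x acc => acc * 2 + (d.getD x (0, 0)).2) 0) := by
  intro n
  induction n with
  | zero =>
    intro rem hlen _ ans weight
    have : rem = [] := List.eq_nil_of_length_eq_zero (Nat.le_zero.mp hlen)
    subst this
    rw [gnvLoop.eq_def]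
    simp [PySem.List.min?, PySem.List.sorted]
  | succ n ih =>
    intro rem hlen hnd ans weight
    rw [gnvLoop.eq_def]
    split
    · next h =>
      have : rem = [] := (PySem.List.min?_eq_none_iff _ _).mp h
      subst this
      simp [PySem.List.sorted]
    · next m h =>
      have hm := PySem.List.min?_mem h
      rw [PySem.List.remove?_eq_some_erase rem m hm, Option.getD_some]
      have hlen' : (rem.erase m).length ≤ n := by
        have := List.length_erase_of_mem hm
        have := List.length_pos_of_mem hm
        omega
      rw [ih (rem.erase m) hlen' (hnd.erase m)]
      rw [sorted_eq_min_cons rem m hnd h, List.foldr_cons]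
      ring

theorem get_number_value_eq_alt (data : List (String × Int × Int)) (c : String)
    (hpre : Pre_get_number_value data c) :
    get_number_value data c = get_number_value_alt data c := by
  obtain ⟨hc, hne⟩ := hpre
  unfold get_number_value get_number_value_alt
  dsimp only
  set d := PySem.Dict.ofList data with hd
  -- c is a single character
  obtain ⟨c0, hc0⟩ : ∃ c0, c.toList = [c0] := by
    rcases hc with h | h <;> exact ⟨_, by rw [h]; rfl⟩
  -- every key of d is nonempty
  have hkey : ∀ k ∈ d.keys, k.toList ≠ [] := by
    intro k hk hkemp
    have : k ∈ data.map Prod.fst := by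
      rw [hd, keys_ofList_eq] at hk
      exact (PySem.Set.mem_ofList _ _).mp hk
    obtain ⟨p, hp, hpk⟩ := List.mem_map.mp this
    exact hne p hp (by rw [hpk]; exact String.toList_eq_nil_iff.mp hkemp)
  -- A's filter loop is a filter, with the same predicate as B's
  rw [PySem.List.foldl_append_if (f := fun x => x)]
  rw [List.nil_append, List.map_id']
  have hfilter : d.keys.filter (fun x =>
      (match PySem.Str.pyGet? x 0 with
        | some ch => decide ([ch] = c.toList)
        | none => false))
      = d.keys.filter (fun k => PySem.Str.startswith k c) := by
    apply List.filter_congr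
    intro k hk
    cases hkl : k.toList with
    | nil => exact absurd hkl (hkey k hk)
    | cons a t =>
      have hget : PySem.Str.pyGet? k 0 = some a := by
        simp [hkl]
      rw [hget, PySem.Str.startswith_eq, hkl, hc0]
      rw [Bool.eq_iff_iff, decide_eq_true_iff, PySem.Chars.startswith_iff]
      constructor
      · intro h
        injection h with h1 _
        exact h1 ▸ ⟨t, rfl⟩
      · rintro ⟨u, hu⟩
        injection hu with h1 _
        rw [h1]
  rw [hfilter]
  set F := d.keys.filter (fun k => PySem.Str.startswith k c) with hF
  -- the filtered keys are pairwise distinct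
  have hFnd : F.Nodup := (PySem.Dict.nodup_keys_ofList data).filter _
  set S := PySem.List.sorted F (fun x => x) false with hS
  have hSnd : S.Nodup := (PySem.List.sorted_perm F (fun x => x) false).nodup_iff.mpr hFnd
  -- descending sort is the reverse of the ascending sort
  have hSrev : PySem.List.sorted F (fun x => x) true = S.reverse := by
    apply PySem.List.sorted_rev_eq_of_perm_of_pairwise_gt
    · exact (List.reverse_perm S).trans (PySem.List.sorted_perm F (fun x => x) false)
    · rw [List.pairwise_reverse]
      have hle := PySem.List.sorted_pairwise F (fun x => x)
      exact (hle.and hSnd).imp (fun ⟨h1, h2⟩ => lt_of_le_of_ne h1 h2)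
  rw [hSrev]
  -- both sides compute the LSB-first value of the ascending arrangement
  have hshift : ∀ (a : Int), a <<< (1 : Nat) = a * 2 := by
    intro a; rw [Int.shiftLeft_eq]; ring
  rw [gnvLoop_eq_sorted_foldr d F.length F le_rfl hFnd 0 1, ← hS]
  calc S.reverse.foldl (fun (ans : Int) x => (ans <<< (1 : Nat)) + (d.getD x (0, 0)).2) 0
      = S.reverse.foldl (fun (ans : Int) x => ans * 2 + (d.getD x (0, 0)).2) 0 := by
        simp only [hshift]
    _ = S.foldr (fun x acc => acc * 2 + (d.getD x (0, 0)).2) 0 := List.foldl_reverse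
    _ = 0 + 1 * S.foldr (fun x acc => acc * 2 + (d.getD x (0, 0)).2) 0 := by ring

-- ===== VERDICT (by name: the statement is the Claim_ definition above) =====
theorem get_number_value_spec : Claim_equal_get_number_value := by
  intro data c _ hpre
  unfold Spec_get_number_value
  exact get_number_value_eq_alt data c hpre
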